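-- pv_equiv track=rewrite | github.com/EternityPrince/ctx | internal/adapter/python/runtime/modules.py | python_import_parts
-- ===== SOURCE A (Python) =====
-- def python_import_parts(rel_path, source_roots=None):
--     rel_path = rel_path.replace("\\", "/")
--     rel_path = trim_python_source_root(rel_path, source_roots or ["src"])
--     if rel_path.endswith(".py"):
--         rel_path = rel_path[:-3]
--     parts = [part for part in rel_path.split("/") if part and part != "."]
--     if parts and parts[-1] == "__init__":
--         parts = parts[:-1]
--     return parts
--
-- def trim_python_source_root(rel_path, source_roots):
--     best = ""
--     for root in sorted(set(source_roots or []), key=lambda value: len(value), reverse=True):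
--         root = (root or "").replace("\\", "/").strip()
--         root = root[2:] if root.startswith("./") else root
--         root = root.rstrip("/")
--         if not root:
--             continue
--         if rel_path == root or rel_path.startswith(root + "/"):
--             best = root
--             break
--     if not best:
--         return rel_path
--     if rel_path == best:
--         return ""
--     return rel_path[len(best) + 1 :]
-- ===== SOURCE B (Python) =====
-- def _normalize_root(raw):
--     r = raw.replace("\\", "/").strip()
--     if r.startswith("./"):
--         r = r[2:]
--     return r.rstrip("/")
--
--
-- def python_import_parts(rel_path, source_roots=None):
--     rel = rel_path.replace("\\", "/")
--     best = None  # (raw length, normalized form) of the best matching root so far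
--     for raw in (source_roots or ["src"]):
--         norm = _normalize_root(raw)
--         if norm and (rel == norm or rel.startswith(norm + "/")) and (
--             best is None or best[0] < len(raw)
--         ):
--             best = (len(raw), norm)
--     if best is not None:
--         rel = "" if rel == best[1] else rel[len(best[1]) + 1 :]
--     name = rel[:-3] if rel.endswith(".py") else rel
--     parts = [p for p in name.split("/") if p not in ("", ".")]
--     return parts[:-1] if parts[-1:] == ["__init__"] else parts
-- ===== Notes on version B (the rewrite author's own statement) =====
-- stated objective: alternative
-- what changed: B replaces A's dedup-then-sort-descending-by-length-then-first-match root selection with a single linear max-scan over the roots that tracks the matching root of greatest raw length, and keeps the .py-strip/split/filter tail.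
-- outside the precondition, e.g. on python_import_parts('a/./x', ['a/.', 'a//']): A returns ['x'], B returns ['x']
import Mathlib
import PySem

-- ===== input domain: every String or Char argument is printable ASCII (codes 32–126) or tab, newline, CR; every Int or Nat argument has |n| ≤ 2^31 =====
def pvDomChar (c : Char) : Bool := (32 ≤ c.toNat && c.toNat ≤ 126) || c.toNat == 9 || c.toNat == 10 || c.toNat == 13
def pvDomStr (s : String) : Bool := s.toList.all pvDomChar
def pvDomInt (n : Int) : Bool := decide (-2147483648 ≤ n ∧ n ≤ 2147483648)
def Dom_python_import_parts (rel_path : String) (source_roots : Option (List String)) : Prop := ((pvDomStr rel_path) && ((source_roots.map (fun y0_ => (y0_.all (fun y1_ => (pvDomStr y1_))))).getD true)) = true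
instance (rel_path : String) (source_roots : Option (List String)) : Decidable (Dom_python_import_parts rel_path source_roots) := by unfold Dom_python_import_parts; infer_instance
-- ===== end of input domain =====

-- B replaces A's dedup/sort-descending-by-raw-length/first-match root selection by a single
-- linear max-scan for the matching root of greatest raw length; same .py-strip/split/filter tail.

-- ===== PORT A =====
-- normalization of one root, as done inside A's loop:
-- (root or "").replace("\\","/").strip(); drop a leading "./"; rstrip("/")
def aNorm (root : String) : String :=
  let r := PySem.Str.replace root "\\" "/"
  let r := PySem.Str.strip r
  let r := if PySem.Str.startswith r "./" then PySem.Str.slice r (some 2) none else r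
  -- root.rstrip("/"): hand port (exact for the single-character strip set "/"): drop trailing '/'
  String.ofList ((r.toList.reverse.dropWhile (fun c => c == '/')).reverse)

-- rel_path == root or rel_path.startswith(root + "/")  (the concatenation done on char lists)
def aMatch (rel root : String) : Bool :=
  rel == root || PySem.Chars.startswith rel.toList (root.toList ++ ['/'])

-- A's for-loop with break: first root (in the given order) that normalizes non-empty and matches
def aTrimLoop (rel : String) : List String → String
  | [] => ""
  | r :: rs =>
    let root := aNorm r
    if root == "" then aTrimLoop rel rs
    else if aMatch rel root then root
    else aTrimLoop rel rs

-- trim_python_source_root: loop over sorted(set(source_roots or []), key=len, reverse=True)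
def aTrim (rel : String) (source_roots : List String) : String :=
  let best := aTrimLoop rel
    (PySem.List.sorted (PySem.Set.ofList (if source_roots.isEmpty then [] else source_roots))
      (fun v => PySem.Str.len v) true)
  if best == "" then rel
  else if rel == best then ""
  else PySem.Str.slice rel (some (PySem.Str.len best + 1)) none

def python_import_parts (rel_path : String) (source_roots : Option (List String)) : List String :=
  let rel := PySem.Str.replace rel_path "\\" "/"
  let rel := aTrim rel (match source_roots with
    | none => ["src"]
    | some l => if l.isEmpty then ["src"] else l)   -- source_roots or ["src"]
  let rel := if PySem.Str.endswith rel ".py" then PySem.Str.slice rel none (some (-3)) else rel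
  let parts := ((PySem.Str.split? rel "/").getD []).filter (fun p => !(p == "") && !(p == "."))
  -- 'if parts and parts[-1] == "__init__"': parts[-1] via pyGet?, which is none on [] (the 'parts and' guard)
  if PySem.List.pyGet? parts (-1) == some "__init__"
  then PySem.List.slice parts none (some (-1)) else parts

-- ===== PORT B =====
-- _normalize_root(raw)  (same normalization steps; rstrip("/") hand-ported as for A)
def bNorm (root : String) : String :=
  let r := PySem.Str.replace root "\\" "/"
  let r := PySem.Str.strip r
  let r := if PySem.Str.startswith r "./" then PySem.Str.slice r (some 2) none else r
  String.ofList ((r.toList.reverse.dropWhile (fun c => c == '/')).reverse)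

def bMatch (rel root : String) : Bool :=
  rel == root || PySem.Chars.startswith rel.toList (root.toList ++ ['/'])

-- B's single pass: keep (raw length, normalized form) of the best matching root so far
def bScan (rel : String) (roots : List String) : Option (Int × String) :=
  roots.foldl (fun best raw =>
    let n := bNorm raw
    if (!(n == "") && bMatch rel n) &&
        (match best with | none => true | some (l, _) => decide (l < PySem.Str.len raw)) then
      some (PySem.Str.len raw, n)
    else best) none

def python_import_parts_alt (rel_path : String) (source_roots : Option (List String)) : List String :=
  let rel := PySem.Str.replace rel_path "\\" "/"
  let roots : List String := match source_roots with
    | none => ["src"]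
    | some l => if l.isEmpty then ["src"] else l   -- source_roots or ["src"]
  let trimmed := match bScan rel roots with
    | none => rel
    | some (_, n) => if rel == n then "" else PySem.Str.slice rel (some (PySem.Str.len n + 1)) none
  let name := if PySem.Str.endswith trimmed ".py" then PySem.Str.slice trimmed none (some (-3)) else trimmed
  let parts := ((PySem.Str.split? name "/").getD []).filter (fun p => !(["", "."].contains p))
  -- parts[:-1] if parts[-1:] == ["__init__"] else parts
  if PySem.List.slice parts (some (-1)) none == ["__init__"]
  then PySem.List.slice parts none (some (-1)) else parts

-- ===== PRECONDITION & SPEC =====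
-- Pre_ excludes inputs where two source roots of equal raw length both match rel_path with two
-- different normalized forms: there A's winner depends on Python's set iteration (hash) order,
-- which is seed-dependent and not a specifiable value.
def preNorm (root : String) : String :=
  let r := PySem.Str.replace root "\\" "/"
  let r := PySem.Str.strip r
  let r := if PySem.Str.startswith r "./" then PySem.Str.slice r (some 2) none else r
  String.ofList ((r.toList.reverse.dropWhile (fun c => c == '/')).reverse)

def preMatch (rel root : String) : Bool :=
  rel == root || PySem.Chars.startswith rel.toList (root.toList ++ ['/'])

def Pre_python_import_parts (rel_path : String) (source_roots : Option (List String)) : Prop :=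
  ∀ r1 ∈ (match source_roots with
          | none => ["src"]
          | some l => if l.isEmpty then ["src"] else l : List String),
  ∀ r2 ∈ (match source_roots with
          | none => ["src"]
          | some l => if l.isEmpty then ["src"] else l : List String),
    PySem.Str.len r1 = PySem.Str.len r2 →
    preNorm r1 ≠ "" → preMatch (PySem.Str.replace rel_path "\\" "/") (preNorm r1) = true →
    preNorm r2 ≠ "" → preMatch (PySem.Str.replace rel_path "\\" "/") (preNorm r2) = true →
    preNorm r1 = preNorm r2

instance (rel_path : String) (source_roots : Option (List String)) : Decidable (Pre_python_import_parts rel_path source_roots) := by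
  unfold Pre_python_import_parts; infer_instance

def pvWitness_python_import_parts : String × Option (List String) := ("src/app/main.py", none)

def Spec_python_import_parts (rel_path : String) (source_roots : Option (List String)) (out : List String) : Prop := out = python_import_parts_alt rel_path source_roots
instance (rel_path : String) (source_roots : Option (List String)) (out : List String) : Decidable (Spec_python_import_parts rel_path source_roots out) := by unfold Spec_python_import_parts; infer_instance

-- ===== CLAIM (what is proved, stated in full; the proofs are below) =====
def Claim_equal_python_import_parts : Prop := ∀ (rel_path : String) (source_roots : Option (List String)), Dom_python_import_parts rel_path source_roots → Pre_python_import_parts rel_path source_roots → Spec_python_import_parts rel_path source_roots (python_import_parts rel_path source_roots)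

-- ===== LEMMAS AND PROOFS =====

-- a root is "good" for rel if it normalizes non-empty and matches rel
def goodP (rel r : String) : Prop := aNorm r ≠ "" ∧ aMatch rel (aNorm r) = true

lemma bNorm_eq_aNorm : bNorm = aNorm := rfl
lemma bMatch_eq_aMatch : bMatch = aMatch := rfl

lemma aTrimLoop_cons (rel r : String) (rs : List String) :
    aTrimLoop rel (r :: rs) =
      if aNorm r == "" then aTrimLoop rel rs
      else if aMatch rel (aNorm r) then aNorm r else aTrimLoop rel rs := rfl

-- A's loop over a length-descending list returns "" when no root is good, else the
-- normalization of a good root of maximal raw length.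
lemma aTrimLoop_char (rel : String) (s : List String)
    (hs : s.Pairwise (fun a b => PySem.Str.len b ≤ PySem.Str.len a)) :
    (aTrimLoop rel s = "" ∧ ∀ r ∈ s, ¬ goodP rel r) ∨
    (∃ r ∈ s, goodP rel r ∧ aTrimLoop rel s = aNorm r ∧
      ∀ r' ∈ s, goodP rel r' → PySem.Str.len r' ≤ PySem.Str.len r) := by
  induction s with
  | nil => exact Or.inl ⟨rfl, by simp⟩
  | cons r rs ih =>
    rw [List.pairwise_cons] at hs
    rcases Classical.em (goodP rel r) with hg | hg
    · refine Or.inr ⟨r, List.mem_cons_self, hg, ?_, ?_⟩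
      · have h0 : (aNorm r == "") = false := beq_eq_false_iff_ne.mpr hg.1
        rw [aTrimLoop_cons, h0, hg.2, if_neg Bool.false_ne_true, if_pos rfl]
      · intro r' hr' _
        rcases List.mem_cons.mp hr' with h | h
        · exact le_of_eq (by rw [h])
        · exact hs.1 r' h
    · have hloop : aTrimLoop rel (r :: rs) = aTrimLoop rel rs := by
        rcases Classical.em (aNorm r = "") with h0 | h0
        · have h0' : (aNorm r == "") = true := beq_iff_eq.mpr h0
          rw [aTrimLoop_cons, h0', if_pos rfl]
        · have h0' : (aNorm r == "") = false := beq_eq_false_iff_ne.mpr h0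
          have hm : aMatch rel (aNorm r) = false := by
            by_contra h
            exact hg ⟨h0, by simpa using h⟩
          rw [aTrimLoop_cons, h0', hm, if_neg Bool.false_ne_true, if_neg Bool.false_ne_true]
      rcases ih hs.2 with ⟨h1, h2⟩ | ⟨w, hw, hwg, hwe, hmax⟩
      · refine Or.inl ⟨hloop.trans h1, ?_⟩
        intro x hx
        rcases List.mem_cons.mp hx with h | h
        · rw [h]; exact hg
        · exact h2 x h
      · refine Or.inr ⟨w, List.mem_cons_of_mem _ hw, hwg, hloop.trans hwe, ?_⟩
        intro r' hr' hgr'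
        rcases List.mem_cons.mp hr' with h | h
        · exact (hg (by rwa [h] at hgr')).elim
        · exact hmax r' h hgr'

-- B's fold step, named so the foldl can be unfolded one element at a time
def bStep (rel : String) (best : Option (Int × String)) (raw : String) : Option (Int × String) :=
  let n := bNorm raw
  if (!(n == "") && bMatch rel n) &&
      (match best with | none => true | some (l, _) => decide (l < PySem.Str.len raw)) then
    some (PySem.Str.len raw, n)
  else best

lemma bScan_eq (rel : String) (roots : List String) :
    bScan rel roots = roots.foldl (bStep rel) none := rfl

lemma bStep_eq (rel : String) (best : Option (Int × String)) (raw : String) :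
    bStep rel best raw =
      if (!(bNorm raw == "") && bMatch rel (bNorm raw)) &&
          (match best with | none => true | some (l, _) => decide (l < PySem.Str.len raw)) then
        some (PySem.Str.len raw, bNorm raw)
      else best := rfl

-- invariant of B's foldl scan
lemma bScan_aux (rel : String) (roots : List String) (acc : Option (Int × String)) :
    (roots.foldl (bStep rel) acc = acc ∧
      ∀ r ∈ roots, goodP rel r → ∃ l n, acc = some (l, n) ∧ PySem.Str.len r ≤ l) ∨
    (∃ r ∈ roots, goodP rel r ∧
      roots.foldl (bStep rel) acc = some (PySem.Str.len r, bNorm r) ∧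
      (∀ r' ∈ roots, goodP rel r' → PySem.Str.len r' ≤ PySem.Str.len r) ∧
      (∀ l n, acc = some (l, n) → l ≤ PySem.Str.len r)) := by
  induction roots generalizing acc with
  | nil => exact Or.inl ⟨rfl, by simp⟩
  | cons raw rs ih =>
    rw [List.foldl_cons, bStep_eq]
    cases hc : ((!(bNorm raw == "") && bMatch rel (bNorm raw)) &&
        (match acc with | none => true | some (l, _) => decide (l < PySem.Str.len raw))) with
    | true =>
      -- the accumulator is updated to raw
      have hg : goodP rel raw := by
        have h1 := ((Bool.and_eq_true _ _).mp ((Bool.and_eq_true _ _).mp hc).1)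
        refine ⟨?_, by rw [← bMatch_eq_aMatch, ← bNorm_eq_aNorm]; exact h1.2⟩
        rw [← bNorm_eq_aNorm]
        simpa using h1.1
      have hacc : ∀ l n, acc = some (l, n) → l < PySem.Str.len raw := by
        intro l n he
        rw [he] at hc
        have h2 := ((Bool.and_eq_true _ _).mp hc).2
        simpa using h2
      rw [if_pos rfl]
      rcases ih (some (PySem.Str.len raw, bNorm raw)) with ⟨h1, h2⟩ | ⟨w, hw, hwg, hwe, hmax, hbound⟩
      · refine Or.inr ⟨raw, List.mem_cons_self, hg, h1, ?_, ?_⟩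
        · intro r' hr' hgr'
          rcases List.mem_cons.mp hr' with h | h
          · exact le_of_eq (by rw [h])
          · obtain ⟨l, n, he, hle⟩ := h2 r' h hgr'
            have hl : PySem.Str.len raw = l := (Prod.ext_iff.mp (Option.some.inj he)).1
            omega
        · intro l n he; exact le_of_lt (hacc l n he)
      · have hrawle : PySem.Str.len raw ≤ PySem.Str.len w := hbound _ _ rfl
        refine Or.inr ⟨w, List.mem_cons_of_mem _ hw, hwg, hwe, ?_, ?_⟩
        · intro r' hr' hgr'
          rcases List.mem_cons.mp hr' with h | h
          · exact le_of_eq (congrArg PySem.Str.len h) |>.trans hrawle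
          · exact hmax r' h hgr'
        · intro l n he; exact le_of_lt (lt_of_lt_of_le (hacc l n he) hrawle)
    | false =>
      -- the accumulator is kept
      rw [if_neg Bool.false_ne_true]
      have hkeep : goodP rel raw → ∃ l n, acc = some (l, n) ∧ PySem.Str.len raw ≤ l := by
        intro hg
        have hb : (!(bNorm raw == "") && bMatch rel (bNorm raw)) = true := by
          rw [bNorm_eq_aNorm, bMatch_eq_aMatch]
          have h0 : (aNorm raw == "") = false := beq_eq_false_iff_ne.mpr hg.1
          simp [h0, hg.2]
        rw [hb, Bool.true_and] at hc
        cases hacc : acc with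
        | none => rw [hacc] at hc; simp at hc
        | some p =>
          obtain ⟨l, n⟩ := p
          rw [hacc] at hc
          simp only [decide_eq_false_iff_not, not_lt] at hc
          exact ⟨l, n, rfl, hc⟩
      rcases ih acc with ⟨h1, h2⟩ | ⟨w, hw, hwg, hwe, hmax, hbound⟩
      · refine Or.inl ⟨h1, ?_⟩
        intro r' hr' hgr'
        rcases List.mem_cons.mp hr' with h | h
        · subst h; exact hkeep hgr'
        · exact h2 r' h hgr'
      · refine Or.inr ⟨w, List.mem_cons_of_mem _ hw, hwg, hwe, ?_, hbound⟩
        intro r' hr' hgr'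
        rcases List.mem_cons.mp hr' with h | h
        · subst h
          obtain ⟨l, n, he, hle⟩ := hkeep hgr'
          exact le_trans hle (hbound l n he)
        · exact hmax r' h hgr'

lemma bScan_char (rel : String) (roots : List String) :
    (bScan rel roots = none ∧ ∀ r ∈ roots, ¬ goodP rel r) ∨
    (∃ r ∈ roots, goodP rel r ∧ bScan rel roots = some (PySem.Str.len r, bNorm r) ∧
      ∀ r' ∈ roots, goodP rel r' → PySem.Str.len r' ≤ PySem.Str.len r) := by
  rw [bScan_eq]
  rcases bScan_aux rel roots none with ⟨h1, h2⟩ | ⟨w, hw, hwg, hwe, hmax, _⟩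
  · refine Or.inl ⟨h1, fun r hr hg => ?_⟩
    obtain ⟨l, n, he, _⟩ := h2 r hr hg
    simp at he
  · exact Or.inr ⟨w, hw, hwg, hwe, hmax⟩

-- the two root selections agree under the tie condition
lemma trim_eq (rel : String) (roots : List String)
    (hpre : ∀ r1 ∈ roots, ∀ r2 ∈ roots, PySem.Str.len r1 = PySem.Str.len r2 →
      goodP rel r1 → goodP rel r2 → aNorm r1 = aNorm r2) :
    aTrim rel roots =
      (match bScan rel roots with
        | none => rel
        | some (_, n) => if rel == n then "" else PySem.Str.slice rel (some (PySem.Str.len n + 1)) none) := by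
  have hmem : ∀ x : String,
      x ∈ PySem.List.sorted (PySem.Set.ofList (if roots.isEmpty then [] else roots))
            (fun v => PySem.Str.len v) true ↔ x ∈ roots := by
    intro x
    rw [PySem.List.mem_sorted, PySem.Set.mem_ofList]
    cases roots <;> simp
  have hpair := PySem.List.sorted_pairwise_rev
    (PySem.Set.ofList (if roots.isEmpty then [] else roots)) (fun v => PySem.Str.len v)
  show (if aTrimLoop rel
          (PySem.List.sorted (PySem.Set.ofList (if roots.isEmpty then [] else roots))
            (fun v => PySem.Str.len v) true) == "" then rel
        else if rel == aTrimLoop rel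
          (PySem.List.sorted (PySem.Set.ofList (if roots.isEmpty then [] else roots))
            (fun v => PySem.Str.len v) true) then ""
        else PySem.Str.slice rel (some (PySem.Str.len (aTrimLoop rel
          (PySem.List.sorted (PySem.Set.ofList (if roots.isEmpty then [] else roots))
            (fun v => PySem.Str.len v) true)) + 1)) none) = _
  rcases aTrimLoop_char rel _ hpair with ⟨h1, h2⟩ | ⟨rA, hrA, hgA, heA, hmaxA⟩
  · -- no good root at all
    have hno : ∀ r ∈ roots, ¬ goodP rel r := fun r hr => h2 r ((hmem r).mpr hr)
    rcases bScan_char rel roots with ⟨hb, _⟩ | ⟨w, hw, hwg, _, _⟩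
    · rw [hb, h1, if_pos (show (("" == "" : Bool) = true) from rfl)]
    · exact absurd hwg (hno w hw)
  · -- a good root exists; both pick one of maximal raw length, equal norm by hpre
    have hrA' : rA ∈ roots := (hmem rA).mp hrA
    rcases bScan_char rel roots with ⟨_, hno⟩ | ⟨rB, hrB, hgB, heB, hmaxB⟩
    · exact absurd hgA (hno rA hrA')
    · have hlen : PySem.Str.len rA = PySem.Str.len rB :=
        le_antisymm (hmaxB rA hrA' hgA) (hmaxA rB ((hmem rB).mpr hrB) hgB)
      have hn : aNorm rA = aNorm rB := hpre rA hrA' rB hrB hlen hgA hgB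
      have hnB : (aNorm rB == "") = false := beq_eq_false_iff_ne.mpr (by rw [← hn]; exact hgA.1)
      rw [heB, heA, hn, hnB, ← bNorm_eq_aNorm, if_neg Bool.false_ne_true]

-- the filter predicates of the two tails agree
lemma filter_pred_eq :
    (fun p : String => !(["", "."].contains p)) = (fun p => !(p == "") && !(p == ".")) := by
  funext p
  simp only [List.contains_cons, List.contains_nil, Bool.or_false, Bool.not_or]

-- parts[-1] == "__init__" (with the nonempty guard) ↔ parts[-1:] == ["__init__"]
lemma last_cond_eq (parts : List String) :
    (PySem.List.pyGet? parts (-1) == some "__init__") =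
      (PySem.List.slice parts (some (-1)) none == ["__init__"]) := by
  rw [PySem.List.pyGet?_neg_one, PySem.List.slice_from_neg_one]
  rcases List.eq_nil_or_concat parts with rfl | ⟨ys, y, rfl⟩
  · simp
  · simp only [List.concat_eq_append, List.getLast?_concat]
    have hdrop : (ys ++ [y]).drop ((ys ++ [y]).length - 1) = [y] := by
      have h : (ys ++ [y]).length - 1 = ys.length := by simp
      rw [h, List.drop_left]
    rw [hdrop]
    by_cases h : y = "__init__" <;> simp [h]

-- the two whole pipelines agree, stated without lets so the rewrites apply
lemma main_eq (rel : String) (L : List String)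
    (hpre : ∀ r1 ∈ L, ∀ r2 ∈ L, PySem.Str.len r1 = PySem.Str.len r2 →
      goodP rel r1 → goodP rel r2 → aNorm r1 = aNorm r2) :
    (if PySem.List.pyGet?
          (((PySem.Str.split? (if PySem.Str.endswith (aTrim rel L) ".py"
              then PySem.Str.slice (aTrim rel L) none (some (-3)) else aTrim rel L) "/").getD []).filter
            (fun p => !(p == "") && !(p == "."))) (-1) == some "__init__"
      then PySem.List.slice
          (((PySem.Str.split? (if PySem.Str.endswith (aTrim rel L) ".py"
              then PySem.Str.slice (aTrim rel L) none (some (-3)) else aTrim rel L) "/").getD []).filter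
            (fun p => !(p == "") && !(p == "."))) none (some (-1))
      else (((PySem.Str.split? (if PySem.Str.endswith (aTrim rel L) ".py"
              then PySem.Str.slice (aTrim rel L) none (some (-3)) else aTrim rel L) "/").getD []).filter
            (fun p => !(p == "") && !(p == "."))))
    =
    (if PySem.List.slice
          (((PySem.Str.split? (if PySem.Str.endswith (match bScan rel L with
                | none => rel
                | some (_, n) => if rel == n then "" else PySem.Str.slice rel (some (PySem.Str.len n + 1)) none) ".py"
              then PySem.Str.slice (match bScan rel L with
                | none => rel
                | some (_, n) => if rel == n then "" else PySem.Str.slice rel (some (PySem.Str.len n + 1)) none) none (some (-3))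
              else (match bScan rel L with
                | none => rel
                | some (_, n) => if rel == n then "" else PySem.Str.slice rel (some (PySem.Str.len n + 1)) none)) "/").getD []).filter
            (fun p => !(["", "."].contains p))) (some (-1)) none == ["__init__"]
      then PySem.List.slice
          (((PySem.Str.split? (if PySem.Str.endswith (match bScan rel L with
                | none => rel
                | some (_, n) => if rel == n then "" else PySem.Str.slice rel (some (PySem.Str.len n + 1)) none) ".py"
              then PySem.Str.slice (match bScan rel L with
                | none => rel
                | some (_, n) => if rel == n then "" else PySem.Str.slice rel (some (PySem.Str.len n + 1)) none) none (some (-3))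
              else (match bScan rel L with
                | none => rel
                | some (_, n) => if rel == n then "" else PySem.Str.slice rel (some (PySem.Str.len n + 1)) none)) "/").getD []).filter
            (fun p => !(["", "."].contains p))) none (some (-1))
      else (((PySem.Str.split? (if PySem.Str.endswith (match bScan rel L with
                | none => rel
                | some (_, n) => if rel == n then "" else PySem.Str.slice rel (some (PySem.Str.len n + 1)) none) ".py"
              then PySem.Str.slice (match bScan rel L with
                | none => rel
                | some (_, n) => if rel == n then "" else PySem.Str.slice rel (some (PySem.Str.len n + 1)) none) none (some (-3))
              else (match bScan rel L with
                | none => rel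
                | some (_, n) => if rel == n then "" else PySem.Str.slice rel (some (PySem.Str.len n + 1)) none)) "/").getD []).filter
            (fun p => !(["", "."].contains p)))) := by
  rw [trim_eq rel L hpre, ← filter_pred_eq, last_cond_eq]

-- ===== VERDICT (by name: the statement is the Claim_ definition above) =====
theorem python_import_parts_spec : Claim_equal_python_import_parts := by
  intro rel_path source_roots _ hpre
  unfold Spec_python_import_parts python_import_parts python_import_parts_alt
  unfold Pre_python_import_parts at hpre
  cases source_roots with
  | none =>
    exact main_eq (PySem.Str.replace rel_path "\\" "/") ["src"]
      (fun r1 h1 r2 h2 hlen hg1 hg2 =>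
        hpre r1 h1 r2 h2 hlen hg1.1 hg1.2 hg2.1 hg2.2)
  | some l =>
    exact main_eq (PySem.Str.replace rel_path "\\" "/") (if l.isEmpty then ["src"] else l)
      (fun r1 h1 r2 h2 hlen hg1 hg2 =>
        hpre r1 h1 r2 h2 hlen hg1.1 hg1.2 hg2.1 hg2.2)
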